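-- pv_equiv track=rewrite | github.com/buvata/spellCorrection | preprocess/handle_text.py | check_all_punct
-- ===== SOURCE A (Python) =====
-- import string
--
-- set_punctuations = set(string.punctuation)
--
-- def check_all_punct(txt):
--     j = False
--     for i in list(txt):
--         if i in set_punctuations:
--             j = True
--         else:
--             j = False
--             break
--
--     return j
-- ===== SOURCE B (Python) =====
-- import string
--
-- set_punctuations = set(string.punctuation)
--
-- def check_all_punct(txt):
--     return txt != '' and set(txt) <= set_punctuations
-- ===== Notes on version B (the rewrite author's own statement) =====
-- stated objective: idiomatic
-- what changed: Replaces the per-character loop with a running flag and early break by a one-line non-empty guard plus a subset test of the string's distinct characters against the punctuation set.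
import Mathlib
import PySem

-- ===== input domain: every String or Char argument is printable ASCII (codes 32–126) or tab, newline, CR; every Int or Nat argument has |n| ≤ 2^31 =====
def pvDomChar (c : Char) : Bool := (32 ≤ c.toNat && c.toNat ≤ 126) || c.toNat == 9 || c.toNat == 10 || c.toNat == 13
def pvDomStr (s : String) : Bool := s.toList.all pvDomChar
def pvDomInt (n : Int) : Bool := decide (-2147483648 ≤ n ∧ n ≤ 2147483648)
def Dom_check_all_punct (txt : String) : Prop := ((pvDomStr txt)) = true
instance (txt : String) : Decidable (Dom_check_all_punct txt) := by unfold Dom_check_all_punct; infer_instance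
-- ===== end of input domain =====

-- B replaces A's per-character flag-and-break loop by a non-empty guard plus one
-- subset test of the string's distinct characters against the punctuation set (idiomatic).


-- module constant: set_punctuations = set(string.punctuation)
def set_punctuations : PySem.Set Char :=
  PySem.Set.ofList "!\"#$%&'()*+,-./:;<=>?@[\\]^_`{|}~".toList

-- ===== PORT A =====
-- the 'for i in list(txt)' loop carrying the flag j, with the break returning j = False
def checkAllPunctLoop : List Char → Bool → Bool
  | [], j => j
  | c :: rest, _ =>
      if PySem.Set.contains set_punctuations c then checkAllPunctLoop rest true
      else false

def check_all_punct (txt : String) : Bool := checkAllPunctLoop txt.toList false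

-- ===== PORT B =====
-- txt != '' and set(txt) <= set_punctuations
def check_all_punct_alt (txt : String) : Bool :=
  !txt.toList.isEmpty &&
    PySem.Set.issubset (PySem.Set.ofList txt.toList) set_punctuations

-- ===== PRECONDITION & SPEC =====
def Spec_check_all_punct (txt : String) (out : Bool) : Prop := out = check_all_punct_alt txt
instance (txt : String) (out : Bool) : Decidable (Spec_check_all_punct txt out) := by unfold Spec_check_all_punct; infer_instance

-- ===== CLAIM (what is proved, stated in full; the proofs are below) =====
def Claim_equal_check_all_punct : Prop := ∀ (txt : String), Dom_check_all_punct txt → Spec_check_all_punct txt (check_all_punct txt)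

-- ===== LEMMAS AND PROOFS =====

-- once the flag is true, A's loop is just 'all characters are punctuation'
theorem checkAllPunctLoop_true (l : List Char) :
    checkAllPunctLoop l true = l.all (fun c => PySem.Set.contains set_punctuations c) := by
  induction l with
  | nil => rfl
  | cons c rest ih =>
      simp only [checkAllPunctLoop, List.all_cons, ih]
      by_cases h : c ∈ set_punctuations <;> simp [h]

-- B's subset test agrees with 'all characters are punctuation'
theorem issubset_eq_all (l : List Char) :
    PySem.Set.issubset (PySem.Set.ofList l) set_punctuations =
      l.all (fun c => PySem.Set.contains set_punctuations c) := by
  rw [Bool.eq_iff_iff]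
  simp [PySem.Set.issubset_iff, PySem.Set.mem_ofList, List.all_eq_true]

-- ===== VERDICT (by name: the statement is the Claim_ definition above) =====
theorem check_all_punct_spec : Claim_equal_check_all_punct := by
  intro txt _
  unfold Spec_check_all_punct check_all_punct check_all_punct_alt
  rw [issubset_eq_all]
  cases h : txt.toList with
  | nil => rfl
  | cons c rest =>
      simp only [checkAllPunctLoop, checkAllPunctLoop_true, List.isEmpty_cons,
        Bool.not_false, Bool.true_and, List.all_cons]
      by_cases hc : c ∈ set_punctuations <;> simp [hc]
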